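-- pv_equiv track=rewrite | github.com/shreevatsa/tex | web2any/readweb.py | split_module
-- ===== SOURCE A (Python) =====
-- def split_module(lines):
--   tex_part = []
--   definition_part = []
--   pascal_part = []
--   i = 0
--
--   # TeX part
--   while i < len(lines):
--     if lines[i].startswith('@d'): break
--     if lines[i].startswith('@f'): break
--     if lines[i].startswith('@p'): break
--     if lines[i].startswith('@<'): break
--     tex_part.append(lines[i])
--     i += 1
--   if i == len(lines):
--     return (tex_part, definition_part, pascal_part)
--
--   # Definition part, if it exists
--   if lines[i].startswith('@d') or lines[i].startswith('@f'):
--     while i < len(lines):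
--       if lines[i].startswith('@p'): break
--       if lines[i].startswith('@<'): break
--       # assert lines[i] == '' or lines[i].startswith('@d') or lines[i].startswith('@f'), ('#%s#' % lines[i], '\n'.join(lines))
--       definition_part.append(lines[i])
--       i += 1
--   if i == len(lines):
--     return (tex_part, definition_part, pascal_part)
--
--   # Pascal part, if we're stil here.
--   assert lines[i].startswith('@p') or lines[i].startswith('@<')
--   while i < len(lines):
--     pascal_part.append(lines[i])
--     i += 1
--   return (tex_part, definition_part, pascal_part)
-- ===== SOURCE B (Python) =====
-- def split_module(lines):
--   parts = ([], [], [])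
--   phase = 0
--   for line in lines:
--     if phase == 0 and line.startswith(('@d', '@f')):
--       phase = 1
--     if phase <= 1 and line.startswith(('@p', '@<')):
--       phase = 2
--     parts[phase].append(line)
--   return parts
-- ===== Notes on version B (the rewrite author's own statement) =====
-- stated objective: alternative
-- what changed: Replace A's three staged while loops over a mutable index (with two early returns and an assert) by a single pass folding a three-state phase automaton over the lines, appending each line to the part selected by the current phase.
import Mathlib
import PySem

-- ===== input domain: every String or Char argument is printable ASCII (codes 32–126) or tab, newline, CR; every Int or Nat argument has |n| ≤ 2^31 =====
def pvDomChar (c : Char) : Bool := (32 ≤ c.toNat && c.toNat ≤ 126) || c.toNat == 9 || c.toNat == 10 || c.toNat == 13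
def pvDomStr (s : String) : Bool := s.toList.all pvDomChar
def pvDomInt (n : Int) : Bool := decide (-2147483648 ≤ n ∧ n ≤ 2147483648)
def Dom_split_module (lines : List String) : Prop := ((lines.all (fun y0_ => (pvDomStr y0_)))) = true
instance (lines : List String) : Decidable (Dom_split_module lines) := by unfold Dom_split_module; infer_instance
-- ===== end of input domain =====

-- B replaces A's three staged index-mutating while loops (with early returns) by a single
-- pass: a three-state phase automaton folded over the lines (alternative decomposition, same O(n) cost;
-- a timing run measured it faster by a constant factor).

-- ===== PORT A =====
-- while loop of the TeX phase: returns (tex_part, remaining lines)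
def pvA_tex : List String → List String × List String
  | [] => ([], [])
  | l :: rest =>
    if PySem.Str.startswith l "@d" then ([], l :: rest)
    else if PySem.Str.startswith l "@f" then ([], l :: rest)
    else if PySem.Str.startswith l "@p" then ([], l :: rest)
    else if PySem.Str.startswith l "@<" then ([], l :: rest)
    else
      let p := pvA_tex rest
      (l :: p.1, p.2)

-- while loop of the definition phase: returns (definition_part, remaining lines)
def pvA_def : List String → List String × List String
  | [] => ([], [])
  | l :: rest =>
    if PySem.Str.startswith l "@p" then ([], l :: rest)
    else if PySem.Str.startswith l "@<" then ([], l :: rest)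
    else
      let p := pvA_def rest
      (l :: p.1, p.2)

def split_module (lines : List String) : List String × List String × List String :=
  let t := pvA_tex lines
  match t.2 with
  | [] => (t.1, [], [])           -- i == len(lines): early return
  | l :: _ =>
    let d :=
      if PySem.Str.startswith l "@d" || PySem.Str.startswith l "@f"
      then pvA_def t.2 else ([], t.2)
    match d.2 with
    | [] => (t.1, d.1, [])        -- i == len(lines): early return
    | rest2 => (t.1, d.1, rest2)  -- pascal while loop appends all remaining lines

-- ===== PORT B =====
-- one step of the loop body: update the phase (two ifs, as in Source B), then append the
-- line to the part selected by the phase (parts[phase].append(line))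
def pvStep (st : Nat × List String × List String × List String) (line : String) :
    Nat × List String × List String × List String :=
  let ph1 := if st.1 == 0 && (PySem.Str.startswith line "@d" || PySem.Str.startswith line "@f") then 1 else st.1
  let ph  := if ph1 ≤ 1 && (PySem.Str.startswith line "@p" || PySem.Str.startswith line "@<") then 2 else ph1
  (ph,
   if ph = 0 then st.2.1 ++ [line] else st.2.1,
   if ph = 1 then st.2.2.1 ++ [line] else st.2.2.1,
   if ph = 2 then st.2.2.2 ++ [line] else st.2.2.2)

def split_module_alt (lines : List String) : List String × List String × List String :=
  (lines.foldl pvStep (0, [], [], [])).2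

-- ===== PRECONDITION & SPEC =====
def Spec_split_module (lines : List String) (out : List String × List String × List String) : Prop := out = split_module_alt lines
instance (lines : List String) (out : List String × List String × List String) : Decidable (Spec_split_module lines out) := by unfold Spec_split_module; infer_instance

-- ===== CLAIM (what is proved, stated in full; the proofs are below) =====
def Claim_equal_split_module : Prop := ∀ (lines : List String), Dom_split_module lines → Spec_split_module lines (split_module lines)

-- ===== LEMMAS AND PROOFS =====

-- two two-char prefixes of the same string agree on the second char
lemma pv_prefix2_disj {l : List Char} {a b c d : Char} (hne : b ≠ d)
    (h1 : [a, b] <+: l) (h2 : [c, d] <+: l) : False := by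
  obtain ⟨t1, h1⟩ := h1
  obtain ⟨t2, h2⟩ := h2
  rw [← h1] at h2
  simp at h2
  exact hne h2.2.1.symm

lemma pv_sw_disj {l : List Char} {a b c d : Char} (hne : b ≠ d)
    (h1 : PySem.Chars.startswith l [a, b] = true)
    (h2 : PySem.Chars.startswith l [c, d] = true) : False := by
  rw [PySem.Chars.startswith_iff] at h1 h2
  exact pv_prefix2_disj hne h1 h2

-- the fold from phase 2 appends everything to the pascal part
lemma pv_fold2 (l : List String) (t d p : List String) :
    List.foldl pvStep (2, t, d, p) l = (2, t, d, p ++ l) := by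
  induction l generalizing p with
  | nil => simp
  | cons a l ih => simp [pvStep, ih]

-- the fold from phase 1 behaves like A's definition-phase loop
lemma pv_fold1 (l : List String) (t d p : List String) :
    List.foldl pvStep (1, t, d, p) l =
      ((if (pvA_def l).2.isEmpty then 1 else 2), t, d ++ (pvA_def l).1, p ++ (pvA_def l).2) := by
  induction l generalizing d with
  | nil => simp [pvA_def]
  | cons a l ih =>
    by_cases hp : PySem.Chars.startswith a.toList ['@', 'p'] = true
    · simp [pvStep, hp, pvA_def, pv_fold2]
    · by_cases hl : PySem.Chars.startswith a.toList ['@', '<'] = true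
      · simp [pvStep, hp, hl, pvA_def, pv_fold2]
      · simp [pvStep, hp, hl, pvA_def, ih]

-- the fold from phase 0 computes exactly A's three parts
lemma pv_fold0 (l : List String) (t d p : List String) :
    (List.foldl pvStep (0, t, d, p) l).2 =
      (t ++ (split_module l).1, d ++ (split_module l).2.1, p ++ (split_module l).2.2) := by
  induction l generalizing t with
  | nil => simp [split_module, pvA_tex]
  | cons a l ih =>
    rw [List.foldl_cons]
    by_cases hd : PySem.Chars.startswith a.toList ['@', 'd'] = true
    · have hp : ¬ PySem.Chars.startswith a.toList ['@', 'p'] = true :=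
        fun h => pv_sw_disj (by decide) hd h
      have hl : ¬ PySem.Chars.startswith a.toList ['@', '<'] = true :=
        fun h => pv_sw_disj (by decide) hd h
      have hstep : pvStep (0, t, d, p) a = (1, t, d ++ [a], p) := by
        simp [pvStep, hd, hp, hl]
      have htex : pvA_tex (a :: l) = ([], a :: l) := by simp [pvA_tex, hd]
      have hdef : pvA_def (a :: l) = (a :: (pvA_def l).1, (pvA_def l).2) := by
        simp [pvA_def, hp, hl]
      rw [hstep, pv_fold1]
      simp [split_module, htex, hd, hdef]
      rcases h2 : (pvA_def l).2 with _ | ⟨x, xs⟩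
      · simp
      · simp
    · by_cases hf : PySem.Chars.startswith a.toList ['@', 'f'] = true
      · have hp : ¬ PySem.Chars.startswith a.toList ['@', 'p'] = true :=
          fun h => pv_sw_disj (by decide) hf h
        have hl : ¬ PySem.Chars.startswith a.toList ['@', '<'] = true :=
          fun h => pv_sw_disj (by decide) hf h
        have hstep : pvStep (0, t, d, p) a = (1, t, d ++ [a], p) := by
          simp [pvStep, hf, hp, hl]
        have htex : pvA_tex (a :: l) = ([], a :: l) := by simp [pvA_tex, hd, hf]
        have hdef : pvA_def (a :: l) = (a :: (pvA_def l).1, (pvA_def l).2) := by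
          simp [pvA_def, hp, hl]
        rw [hstep, pv_fold1]
        simp [split_module, htex, hd, hf, hdef]
        rcases h2 : (pvA_def l).2 with _ | ⟨x, xs⟩
        · simp
        · simp
      · by_cases hp : PySem.Chars.startswith a.toList ['@', 'p'] = true
        · have hstep : pvStep (0, t, d, p) a = (2, t, d, p ++ [a]) := by
            simp [pvStep, hd, hf, hp]
          have htex : pvA_tex (a :: l) = ([], a :: l) := by simp [pvA_tex, hd, hf, hp]
          rw [hstep, pv_fold2]
          simp [split_module, htex, hd, hf]
        · by_cases hl : PySem.Chars.startswith a.toList ['@', '<'] = true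
          · have hstep : pvStep (0, t, d, p) a = (2, t, d, p ++ [a]) := by
              simp [pvStep, hd, hf, hp, hl]
            have htex : pvA_tex (a :: l) = ([], a :: l) := by
              simp [pvA_tex, hd, hf, hp, hl]
            rw [hstep, pv_fold2]
            simp [split_module, htex, hd, hf]
          · have hstep : pvStep (0, t, d, p) a = (0, t ++ [a], d, p) := by
              simp [pvStep, hd, hf, hp, hl]
            have htex : pvA_tex (a :: l) = (a :: (pvA_tex l).1, (pvA_tex l).2) := by
              simp [pvA_tex, hd, hf, hp, hl]
            rw [hstep, ih]
            simp only [split_module, htex]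
            rcases h2 : (pvA_tex l).2 with _ | ⟨x, xs⟩
            · simp
            · by_cases hx : (PySem.Chars.startswith x.toList ['@', 'd'] = true ∨
                  PySem.Chars.startswith x.toList ['@', 'f'] = true)
              · rcases h3 : (pvA_def (x :: xs)).2 with _ | ⟨y, ys⟩
                · simp [hx, h3]
                · simp [hx, h3]
              · simp [hx]

-- ===== VERDICT (by name: the statement is the Claim_ definition above) =====
theorem split_module_spec : Claim_equal_split_module := by
  intro lines _
  unfold Spec_split_module split_module_alt
  rw [pv_fold0]
  simp
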